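-- pv_equiv track=rewrite | github.com/zackees/zcmds | pysrc/cmds/common/ytclip.py | _find_video_file_from_stdout
-- ===== SOURCE A (Python) =====
-- from typing import Optional, Tuple
--
-- def _find_video_file_from_stdout(stdout: str) -> Optional[str]:
--     value = None
--     for line in stdout.splitlines():
--         # File pattern # 1
--         needle = '[Merger] Merging formats into "'
--         if needle in line:
--             value = line.replace(needle, "").replace('"', "")
--             continue
--         # File pattern # 2 (found in brighteon)
--         needle = "[download] Destination: "
--         if needle in line:
--             value = line.replace(needle, "")
--             continue
--     return value
-- ===== SOURCE B (Python) =====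
-- from typing import Optional
--
-- def _find_video_file_from_stdout(stdout: str) -> Optional[str]:
--     for line in reversed(stdout.splitlines()):
--         needle = '[Merger] Merging formats into "'
--         if needle in line:
--             return line.replace(needle, "").replace('"', "")
--         needle = "[download] Destination: "
--         if needle in line:
--             return line.replace(needle, "")
--     return None
-- ===== Notes on version B (the rewrite author's own statement) =====
-- stated objective: alternative
-- what changed: Replaced the forward scan that keeps overwriting an accumulator variable with a backward scan over reversed(splitlines) that returns the first matching line immediately (early exit, no accumulator).
import Mathlib
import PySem

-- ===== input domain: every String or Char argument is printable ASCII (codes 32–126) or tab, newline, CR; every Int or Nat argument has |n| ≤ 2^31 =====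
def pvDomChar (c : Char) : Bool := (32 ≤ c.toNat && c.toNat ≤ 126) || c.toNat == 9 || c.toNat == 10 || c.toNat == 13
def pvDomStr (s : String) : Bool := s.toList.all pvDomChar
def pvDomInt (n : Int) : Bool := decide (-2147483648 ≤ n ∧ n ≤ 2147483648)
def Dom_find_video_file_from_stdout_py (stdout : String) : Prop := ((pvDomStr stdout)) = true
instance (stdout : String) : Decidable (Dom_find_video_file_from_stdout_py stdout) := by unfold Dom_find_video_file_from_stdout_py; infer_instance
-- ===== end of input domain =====

-- B replaces A's forward scan with an overwritten accumulator by a backward scan returning the first match (alternative decomposition; same cost).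

-- ===== PORT A =====
-- forward fold over splitlines, keeping the last match in 'value'
def find_video_file_from_stdout_py (stdout : String) : Option String :=
  (PySem.Str.splitlines stdout).foldl
    (fun value line =>
      if PySem.Str.isIn "[Merger] Merging formats into \"" line then
        some (PySem.Str.replace (PySem.Str.replace line "[Merger] Merging formats into \"" "") "\"" "")
      else if PySem.Str.isIn "[download] Destination: " line then
        some (PySem.Str.replace line "[download] Destination: " "")
      else value)
    none

-- ===== PORT B =====
-- early-exit scan over the reversed line list
def findFromEnd : List String → Option String
  | [] => none
  | line :: rest =>
    if PySem.Str.isIn "[Merger] Merging formats into \"" line then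
      some (PySem.Str.replace (PySem.Str.replace line "[Merger] Merging formats into \"" "") "\"" "")
    else if PySem.Str.isIn "[download] Destination: " line then
      some (PySem.Str.replace line "[download] Destination: " "")
    else findFromEnd rest

def find_video_file_from_stdout_py_alt (stdout : String) : Option String :=
  findFromEnd (PySem.Str.splitlines stdout).reverse

-- ===== PRECONDITION & SPEC =====
def Spec_find_video_file_from_stdout_py (stdout : String) (out : Option String) : Prop := out = find_video_file_from_stdout_py_alt stdout
instance (stdout : String) (out : Option String) : Decidable (Spec_find_video_file_from_stdout_py stdout out) := by unfold Spec_find_video_file_from_stdout_py; infer_instance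

-- ===== CLAIM (what is proved, stated in full; the proofs are below) =====
def Claim_equal_find_video_file_from_stdout_py : Prop := ∀ (stdout : String), Dom_find_video_file_from_stdout_py stdout → Spec_find_video_file_from_stdout_py stdout (find_video_file_from_stdout_py stdout)

-- ===== LEMMAS AND PROOFS =====

theorem findFromEnd_append (l1 l2 : List String) :
    findFromEnd (l1 ++ l2) = (findFromEnd l1).orElse (fun _ => findFromEnd l2) := by
  induction l1 with
  | nil => simp [findFromEnd, Option.orElse]
  | cons x xs ih =>
    simp only [List.cons_append, findFromEnd]
    split_ifs <;> simp [Option.orElse, ih]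

theorem foldl_eq_findFromEnd (ls : List String) (acc : Option String) :
    ls.foldl
      (fun value line =>
        if PySem.Str.isIn "[Merger] Merging formats into \"" line then
          some (PySem.Str.replace (PySem.Str.replace line "[Merger] Merging formats into \"" "") "\"" "")
        else if PySem.Str.isIn "[download] Destination: " line then
          some (PySem.Str.replace line "[download] Destination: " "")
        else value)
      acc
    = (findFromEnd ls.reverse).orElse (fun _ => acc) := by
  induction ls generalizing acc with
  | nil => simp [findFromEnd, Option.orElse]
  | cons x xs ih =>
    simp only [List.foldl_cons, List.reverse_cons, findFromEnd_append, ih]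
    cases h : findFromEnd xs.reverse with
    | some v => simp [Option.orElse]
    | none =>
      simp only [Option.orElse, findFromEnd]
      split_ifs <;> rfl

-- ===== VERDICT (by name: the statement is the Claim_ definition above) =====
theorem find_video_file_from_stdout_py_spec : Claim_equal_find_video_file_from_stdout_py := by
  intro stdout _
  unfold Spec_find_video_file_from_stdout_py find_video_file_from_stdout_py find_video_file_from_stdout_py_alt
  rw [foldl_eq_findFromEnd]
  cases h : findFromEnd (PySem.Str.splitlines stdout).reverse <;> simp [Option.orElse]
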